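-- pv_equiv track=rewrite | github.com/aryanzandi123/- | utils/chain_resolution.py | _acronym_matches_phrase
-- ===== SOURCE A (Python) =====
-- def _acronym_matches_phrase(acronym: str, words: list[str]) -> bool:
--     """Check if *acronym* can be formed by taking leading chars from *words* in order.
--
--     Handles biology acronyms where some words contribute multiple leading
--     characters (e.g. "ER-associated degradation" -> "ERAD": ER=2 chars, A=1, D=1).
--     """
--     if not acronym or not words:
--         return False
--
--     # Recursive helper with memoisation.
--     def _match(ai: int, wi: int, ci: int) -> bool:
--         """Can acronym[ai:] be matched starting at words[wi][ci:]?"""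
--         if ai == len(acronym):
--             return True
--         if wi >= len(words):
--             return False
--
--         word = words[wi]
--         # Try consuming 1..N leading characters from current word.
--         for take in range(1, len(word) - ci + 1):
--             if word[ci : ci + take] == acronym[ai : ai + take]:
--                 # Continue within same word (more chars) or move to next word.
--                 if _match(ai + take, wi + 1, 0):
--                     return True
--             else:
--                 break
--         # Skip current word entirely (optional word in expansion).
--         return _match(ai, wi + 1, 0)
--
--     return _match(0, 0, 0)
-- ===== SOURCE B (Python) =====
-- def _acronym_matches_phrase(acronym: str, words: list[str]) -> bool:
--     """Iterative DP: dp[ai] == "acronym[ai:] can be matched by the remaining words".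
--
--     Processes words right-to-left, so the exponential recursion of the original
--     becomes an O(len(words) * len(acronym) * max word length) table fill.
--     """
--     if not acronym or not words:
--         return False
--     n = len(acronym)
--
--     def can_extend(dp, word, ai):
--         # is there k >= 1 with word[:k] == acronym[ai:ai+k] and dp[ai+k]?
--         k = 0
--         while k < len(word) and ai + k < n and word[k] == acronym[ai + k]:
--             k += 1
--             if dp[ai + k]:
--                 return True
--         return False
--
--     dp = [ai == n for ai in range(n + 1)]
--     for word in reversed(words):
--         dp = [dp[ai] or can_extend(dp, word, ai) for ai in range(n + 1)]
--     return dp[0]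
-- ===== Notes on version B (the rewrite author's own statement) =====
-- stated objective: faster
-- what changed: Replaces the unmemoised exponential recursion over (acronym position, word index) by an iterative right-to-left DP table dp[ai] = 'acronym[ai:] matchable by remaining words', updated once per word.
import Mathlib
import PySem

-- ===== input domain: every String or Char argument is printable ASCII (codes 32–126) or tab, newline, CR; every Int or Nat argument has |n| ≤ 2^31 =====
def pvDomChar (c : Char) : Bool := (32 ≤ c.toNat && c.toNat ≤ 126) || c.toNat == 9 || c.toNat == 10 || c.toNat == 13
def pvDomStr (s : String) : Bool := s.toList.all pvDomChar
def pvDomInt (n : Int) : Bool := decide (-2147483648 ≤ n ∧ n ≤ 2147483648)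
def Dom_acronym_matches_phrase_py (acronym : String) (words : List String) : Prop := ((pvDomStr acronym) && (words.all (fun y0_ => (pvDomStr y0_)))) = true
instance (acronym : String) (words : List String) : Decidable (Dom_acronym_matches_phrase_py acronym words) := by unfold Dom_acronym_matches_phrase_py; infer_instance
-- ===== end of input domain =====

-- B replaces A's unmemoised exponential recursion by an iterative right-to-left DP table
-- dp[ai] = "acronym[ai:] matchable by the remaining words" (objective: faster, asymptotically).

-- ===== PORT A =====
-- Literal port of A's recursive helper `_match(ai, wi, ci)`; its `for take in range(...)`
-- loop (with `break` and early `return True`) is the structural recursion pvALoop over the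
-- pyRange list.  `words[wi]` is guarded by `wi < len(words)`, so getD is exact there.
def pvALoop (acr : List Char) (ai ci : Nat) (word : List Char) (next : Nat → Bool) :
    List Int → Bool
  | [] => next ai
  | take :: rest =>
    if PySem.List.slice word (some (ci : Int)) (some ((ci : Int) + take))
         = PySem.List.slice acr (some (ai : Int)) (some ((ai : Int) + take)) then
      if next (ai + take.toNat) then true
      else pvALoop acr ai ci word next rest
    else next ai

def pvAMatch (acr : List Char) (words : List String) (ai wi ci : Nat) : Bool :=
  if ai = acr.length then true
  else if words.length ≤ wi then false
  else
    let word := (words.getD wi "").toList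
    pvALoop acr ai ci word (fun ai' => pvAMatch acr words ai' (wi + 1) 0)
      (PySem.List.pyRange 1 ((word.length : Int) - (ci : Int) + 1) 1)
  termination_by words.length - wi
  decreasing_by omega

def acronym_matches_phrase_py (acronym : String) (words : List String) : Bool :=
  if acronym.toList = [] || words.isEmpty then false
  else pvAMatch acronym.toList words 0 0 0

-- ===== PORT B =====
-- Port of Source B's `can_extend` while-loop; `word[k]` / `acronym[ai+k]` / `dp[ai+k]` are
-- guarded in range by the loop condition and the dp length, so getD is exact there.
def pvTryRun (acr word : List Char) (dp : List Bool) (ai k : Nat) : Bool :=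
  if k < word.length ∧ ai + k < acr.length ∧ word.getD k ' ' = acr.getD (ai + k) ' ' then
    (if dp.getD (ai + k + 1) false then true else pvTryRun acr word dp ai (k + 1))
  else false
  termination_by word.length - k

-- one DP update: dp = [dp[ai] or can_extend(dp, word, ai) for ai in range(n+1)]
def pvStep (acr : List Char) (dp : List Bool) (word : List Char) : List Bool :=
  (List.range (acr.length + 1)).map (fun ai => dp.getD ai false || pvTryRun acr word dp ai 0)

def acronym_matches_phrase_py_alt (acronym : String) (words : List String) : Bool :=
  if acronym.toList = [] || words.isEmpty then false
  else
    let acr := acronym.toList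
    let dp0 := (List.range (acr.length + 1)).map (fun ai => decide (ai = acr.length))
    (words.reverse.foldl (fun dp w => pvStep acr dp w.toList) dp0).getD 0 false

-- ===== PRECONDITION & SPEC =====
def Spec_acronym_matches_phrase_py (acronym : String) (words : List String) (out : Bool) : Prop := out = acronym_matches_phrase_py_alt acronym words
instance (acronym : String) (words : List String) (out : Bool) : Decidable (Spec_acronym_matches_phrase_py acronym words out) := by unfold Spec_acronym_matches_phrase_py; infer_instance

-- ===== CLAIM (what is proved, stated in full; the proofs are below) =====
def Claim_equal_acronym_matches_phrase_py : Prop := ∀ (acronym : String) (words : List String), Dom_acronym_matches_phrase_py acronym words → Spec_acronym_matches_phrase_py acronym words (acronym_matches_phrase_py acronym words)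

-- ===== LEMMAS AND PROOFS =====

-- Reference semantics: recursion directly on the list of remaining words, with
-- per-character prefix comparison; both ports are proved equal to it.
def mrun (acr w : List Char) (ai : Nat) (next : Nat → Bool) (k : Nat) : Bool :=
  if k < w.length ∧ ai + k < acr.length ∧ w.getD k ' ' = acr.getD (ai + k) ' ' then
    (if next (ai + k + 1) then true else mrun acr w ai next (k + 1))
  else next ai
  termination_by w.length - k
  decreasing_by omega

def mref (acr : List Char) : List (List Char) → Nat → Bool
  | [], ai => decide (ai = acr.length)
  | w :: ws', ai =>
    if ai = acr.length then true
    else mrun acr w ai (fun ai' => mref acr ws' ai') 0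

lemma mref_at_len (acr : List Char) (ws : List (List Char)) : mref acr ws acr.length = true := by
  cases ws <;> simp [mref]

-- getD on the dp table produced by mapping f over range (n+1)
lemma dp_getD (n : Nat) (f : Nat → Bool) {j : Nat} (hj : j ≤ n) :
    (((List.range (n + 1)).map f).getD j false) = f j := by
  rw [List.getD_eq_getElem?_getD]
  simp [Nat.lt_succ_of_le hj]

-- B's while-loop, with dp tabulating mref, computes mrun (up to the skip disjunct).
lemma mrun_eq (acr w : List Char) (ws' : List (List Char)) (dp : List Bool)
    (hdp : ∀ j, j ≤ acr.length → dp.getD j false = mref acr ws' j)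
    (ai : Nat) (hai : ai ≤ acr.length) (k : Nat) :
    mrun acr w ai (fun a' => mref acr ws' a') k = (dp.getD ai false || pvTryRun acr w dp ai k) := by
  have key : ∀ m k, w.length - k ≤ m →
      mrun acr w ai (fun a' => mref acr ws' a') k = (dp.getD ai false || pvTryRun acr w dp ai k) := by
    intro m
    induction m with
    | zero =>
      intro k hk
      rw [mrun, pvTryRun]
      have hcond : ¬(k < w.length ∧ ai + k < acr.length ∧ w.getD k ' ' = acr.getD (ai + k) ' ') := by
        rintro ⟨h1, -, -⟩; omega
      rw [if_neg hcond, if_neg hcond, Bool.or_false, hdp ai hai]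
    | succ m ih =>
      intro k hk
      rw [mrun, pvTryRun]
      by_cases hcond : (k < w.length ∧ ai + k < acr.length ∧ w.getD k ' ' = acr.getD (ai + k) ' ')
      · rw [if_pos hcond, if_pos hcond]
        have h1 : ai + k + 1 ≤ acr.length := by omega
        rw [hdp _ h1]
        cases hmr : mref acr ws' (ai + k + 1) with
        | true => simp
        | false =>
          simp only [Bool.false_eq_true, if_false]
          rw [ih (k + 1) (by omega)]
      · rw [if_neg hcond, if_neg hcond, Bool.or_false, hdp ai hai]
  exact key w.length k (by omega)

-- one pvStep preserves the tabulation invariant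
lemma step_inv (acr : List Char) (w : List Char) (ws' : List (List Char)) (dp : List Bool)
    (hdp : dp = (List.range (acr.length + 1)).map (fun ai => mref acr ws' ai)) :
    pvStep acr dp w = (List.range (acr.length + 1)).map (fun ai => mref acr (w :: ws') ai) := by
  subst hdp
  unfold pvStep
  refine List.map_congr_left ?_
  intro ai hmem
  have hai : ai ≤ acr.length := Nat.lt_succ_iff.mp (List.mem_range.mp hmem)
  by_cases h : ai = acr.length
  · subst h
    rw [dp_getD _ _ le_rfl, mref_at_len, mref_at_len]
    simp
  · rw [mref, if_neg h]
    exact (mrun_eq acr w ws' _ (fun j hj => dp_getD _ _ hj) ai hai 0).symm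

lemma fold_inv (acr : List Char) (ws : List String) :
    ws.foldr (fun w dp => pvStep acr dp w.toList)
        ((List.range (acr.length + 1)).map (fun ai => decide (ai = acr.length)))
      = (List.range (acr.length + 1)).map (fun ai => mref acr (ws.map String.toList) ai) := by
  induction ws with
  | nil => simp [mref]
  | cons w ws ih =>
    rw [List.foldr_cons, ih]
    exact step_inv acr w.toList (ws.map String.toList) _ rfl

-- reduction of the two Python slices to take/drop form
lemma slice_red1 (word : List Char) (k : Nat) :
    PySem.List.slice word (some ((0 : Nat) : Int)) (some (((0 : Nat) : Int) + ((k : Int) + 1)))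
      = word.take (k + 1) := by
  have h : ((0 : Nat) : Int) + ((k : Int) + 1) = ((k + 1 : Nat) : Int) := by push_cast; ring
  rw [h]
  simpa using PySem.List.slice_natCast word 0 (k + 1)

lemma slice_red2 (acr : List Char) (ai k : Nat) :
    PySem.List.slice acr (some (ai : Int)) (some ((ai : Int) + ((k : Int) + 1)))
      = (acr.drop ai).take (k + 1) := by
  have h : (ai : Int) + ((k : Int) + 1) = (ai : Int) + ((k + 1 : Nat) : Int) := by push_cast; ring
  rw [h, PySem.List.slice_natCast_add]

-- extending a matching prefix by one character
lemma take_succ_iff (word acr : List Char) (ai k : Nat) (hkL : k < word.length)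
    (hpre : word.take k = (acr.drop ai).take k) :
    (word.take (k + 1) = (acr.drop ai).take (k + 1)
      ↔ (ai + k < acr.length ∧ word.getD k ' ' = acr.getD (ai + k) ' ')) := by
  rw [List.take_add_one, List.take_add_one, hpre, List.append_right_inj]
  rw [List.getElem?_drop]
  rw [List.getElem?_eq_getElem hkL]
  constructor
  · intro h
    have hlt : ai + k < acr.length := by
      rcases hx : acr[ai + k]? with _ | c
      · rw [hx] at h; simp at h
      · exact (List.getElem?_eq_some_iff.mp hx).1
    refine ⟨hlt, ?_⟩
    rw [List.getElem?_eq_getElem hlt] at h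
    simp only [Option.toList_some, List.cons.injEq] at h
    rw [List.getD_eq_getElem word ' ' hkL, List.getD_eq_getElem acr ' ' hlt, h.1]
  · rintro ⟨hlt, hch⟩
    rw [List.getElem?_eq_getElem hlt]
    rw [List.getD_eq_getElem word ' ' hkL, List.getD_eq_getElem acr ' ' hlt] at hch
    simp [hch]

-- the terminal case of A's take-loop (k has reached len(word))
lemma loop_done (acr word : List Char) (next : Nat → Bool) (ws' : List (List Char))
    (hnext : ∀ a', a' ≤ acr.length → next a' = mref acr ws' a') (ai : Nat) (hai : ai ≤ acr.length)
    (k : Nat) (hkk : word.length ≤ k) :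
    pvALoop acr ai 0 word next (PySem.List.pyRange ((k : Int) + 1) ((word.length : Int) + 1) 1)
      = mrun acr word ai (fun a' => mref acr ws' a') k := by
  rw [PySem.List.pyRange_one_eq_nil (by exact_mod_cast Nat.succ_le_succ hkk)]
  rw [pvALoop, mrun]
  rw [if_neg (by rintro ⟨h1, -, -⟩; omega)]
  exact hnext ai hai

-- A's take-loop equals mrun, given the continuation agrees with mref
lemma loop_bridge (acr word : List Char) (next : Nat → Bool) (ws' : List (List Char))
    (hnext : ∀ a', a' ≤ acr.length → next a' = mref acr ws' a') (ai : Nat) (hai : ai ≤ acr.length) :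
    ∀ k, k ≤ word.length → ai + k ≤ acr.length → word.take k = (acr.drop ai).take k →
    pvALoop acr ai 0 word next (PySem.List.pyRange ((k : Int) + 1) ((word.length : Int) + 1) 1)
      = mrun acr word ai (fun a' => mref acr ws' a') k := by
  have key : ∀ m k, word.length - k ≤ m → k ≤ word.length → ai + k ≤ acr.length →
      word.take k = (acr.drop ai).take k →
      pvALoop acr ai 0 word next (PySem.List.pyRange ((k : Int) + 1) ((word.length : Int) + 1) 1)
        = mrun acr word ai (fun a' => mref acr ws' a') k := by
    intro m
    induction m with
    | zero =>
      intro k hm hkL hk hpre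
      exact loop_done acr word next ws' hnext ai hai k (by omega)
    | succ m ih =>
      intro k hm hkL hk hpre
      by_cases hkL' : k < word.length
      · rw [PySem.List.pyRange_one_cons (by exact_mod_cast Nat.succ_lt_succ hkL')]
        rw [pvALoop, mrun]
        rw [slice_red1, slice_red2]
        by_cases hc : (ai + k < acr.length ∧ word.getD k ' ' = acr.getD (ai + k) ' ')
        · rw [if_pos ((take_succ_iff word acr ai k hkL' hpre).mpr hc)]
          rw [if_pos (show k < word.length ∧ ai + k < acr.length ∧
                word.getD k ' ' = acr.getD (ai + k) ' ' from ⟨hkL', hc.1, hc.2⟩)]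
          rw [show ((k : Int) + 1).toNat = k + 1 from by omega]
          rw [hnext (ai + (k + 1)) (by omega)]
          rw [show ai + (k + 1) = ai + k + 1 from by omega]
          cases hmr : mref acr ws' (ai + k + 1) with
          | true => simp
          | false =>
            simp only [Bool.false_eq_true, if_false]
            rw [show (k : Int) + 1 + 1 = ((k + 1 : Nat) : Int) + 1 from by push_cast; ring]
            exact ih (k + 1) (by omega) (by omega) (by omega)
              ((take_succ_iff word acr ai k hkL' hpre).mpr hc)
        · rw [if_neg (fun hx => hc ((take_succ_iff word acr ai k hkL' hpre).mp hx))]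
          rw [if_neg (by rintro ⟨-, h2, h3⟩; exact hc ⟨h2, h3⟩)]
          exact hnext ai hai
      · exact loop_done acr word next ws' hnext ai hai k (by omega)
  intro k hkL hk hpre
  exact key word.length k (by omega) hkL hk hpre

lemma bridge (acr : List Char) (words : List String) :
    ∀ wi ai, ai ≤ acr.length →
      pvAMatch acr words ai wi 0 = mref acr ((words.drop wi).map String.toList) ai := by
  have key : ∀ m wi ai, words.length - wi ≤ m → ai ≤ acr.length →
      pvAMatch acr words ai wi 0 = mref acr ((words.drop wi).map String.toList) ai := by
    intro m
    induction m with
    | zero =>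
      intro wi ai hm hai
      rw [pvAMatch]
      by_cases h : ai = acr.length
      · subst h
        rw [if_pos rfl, mref_at_len]
      · rw [if_neg h, if_pos (by omega : words.length ≤ wi)]
        rw [List.drop_eq_nil_of_le (by omega)]
        simp [mref, h]
    | succ m ih =>
      intro wi ai hm hai
      rw [pvAMatch]
      by_cases h : ai = acr.length
      · subst h
        rw [if_pos rfl, mref_at_len]
      · rw [if_neg h]
        by_cases hw : words.length ≤ wi
        · rw [if_pos hw, List.drop_eq_nil_of_le hw]
          simp [mref, h]
        · rw [if_neg hw]
          rw [List.drop_eq_getElem_cons (by omega : wi < words.length)]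
          rw [List.map_cons, mref, if_neg h]
          have hget : words.getD wi "" = words[wi] := List.getD_eq_getElem words "" (by omega)
          have hnext : ∀ a', a' ≤ acr.length →
              pvAMatch acr words a' (wi + 1) 0 = mref acr ((words.drop (wi + 1)).map String.toList) a' :=
            fun a' ha' => ih (wi + 1) a' (by omega) ha'
          have hlb := loop_bridge acr (words[wi]).toList _ _ hnext ai hai 0
            (by omega) (by omega) (by simp)
          simp only [hget]
          simpa using hlb
  intro wi ai hai
  exact key words.length wi ai (by omega) hai

-- ===== VERDICT (by name: the statement is the Claim_ definition above) =====
theorem acronym_matches_phrase_py_spec : Claim_equal_acronym_matches_phrase_py := by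
  intro acronym words _
  unfold Spec_acronym_matches_phrase_py acronym_matches_phrase_py acronym_matches_phrase_py_alt
  by_cases hg : (acronym.toList = [] || words.isEmpty) = true
  · rw [if_pos hg, if_pos hg]
  · rw [if_neg hg, if_neg hg]
    simp only [List.foldl_reverse]
    rw [fold_inv]
    rw [bridge acronym.toList words 0 0 (Nat.zero_le _)]
    rw [List.drop_zero, dp_getD _ _ (Nat.zero_le _)]
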